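-- pv_equiv track=rewrite | github.com/Radcliffe/OEIS-Python | src/oeispy/A357/A357073.py | A357073
-- ===== SOURCE A (Python) =====
-- def A357073(n):
--     tlist, s, m = [1, 2], 0, n
--     while (t:=tlist[-1]+tlist[-2]) <= n:
--         tlist.append(t)
--     for d in tlist[::-1]:
--         s = (s<<1)%n
--         if d <= m:
--             s = (s+1)%n
--             m -= d
--     return s # _Chai Wah Wu_, Sep 11 2022
-- ===== SOURCE B (Python) =====
-- def A357073(n):
--     tlist = [1, 2]
--     while tlist[-1] + tlist[-2] <= n:
--         tlist.append(tlist[-1] + tlist[-2])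
--     # Zeckendorf by repeated binary search for the largest Fibonacci <= remainder:
--     # only the selected terms are visited, instead of scanning the whole list.
--     total, m = 0, n
--     while m > 0:
--         lo, hi = 0, len(tlist)
--         while lo < hi:
--             mid = (lo + hi) // 2
--             if tlist[mid] <= m:
--                 lo = mid + 1
--             else:
--                 hi = mid
--         i = lo - 1
--         total += 1 << i
--         m -= tlist[i]
--     return total % n
-- ===== Notes on version B (the rewrite author's own statement) =====
-- stated objective: alternative
-- what changed: B keeps the Fibonacci-list construction but replaces A's single reverse scan over every Fibonacci term (with a modular shift-add per term) by a while-loop on the remainder that finds each selected Fibonacci term with a hand-written binary search, ORs its power of two into the result, and reduces mod n once at the end.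
-- outside the precondition, e.g. on A357073(0): A raises ZeroDivisionError, B raises ZeroDivisionError
import Mathlib
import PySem

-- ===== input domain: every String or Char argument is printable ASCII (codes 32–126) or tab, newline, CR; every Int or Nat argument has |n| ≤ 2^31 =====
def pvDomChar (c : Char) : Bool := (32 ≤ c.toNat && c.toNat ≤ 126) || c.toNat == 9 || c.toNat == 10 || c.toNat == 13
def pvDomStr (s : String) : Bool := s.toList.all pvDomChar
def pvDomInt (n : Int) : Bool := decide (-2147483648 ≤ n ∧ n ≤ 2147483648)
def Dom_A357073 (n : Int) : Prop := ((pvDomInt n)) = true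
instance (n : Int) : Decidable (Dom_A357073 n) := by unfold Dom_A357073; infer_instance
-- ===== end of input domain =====

-- Header: B replaces A's reverse scan over every Fibonacci term (modular shift-add per
-- term) by a while-loop on the remainder that locates each selected term by binary
-- search and reduces mod n once at the end (objective: alternative).

-- ===== PORT A =====
-- shared Fibonacci-list construction (identical lines in A and in B's Python): the fuel
-- argument only makes the `while` loop total; with fuel n.toNat + 2 it never runs out.
def tlistGo (fuel : Nat) (a b n : Int) (acc : List Int) : List Int :=
  match fuel with
  | 0 => acc
  | fuel + 1 =>
      if a + b ≤ n then tlistGo fuel b (a + b) n (acc ++ [a + b]) else acc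

def tlistFor (n : Int) : List Int :=
  tlistGo (n.toNat + 2) 1 2 n [1, 2]

def A357073 (n : Int) : Int :=
  let tlist := tlistFor n
  let rev := (PySem.List.slice? tlist none none (-1)).getD []   -- tlist[::-1]
  (rev.foldl
    (fun (sm : Int × Int) d =>
      let s1 := PySem.Int.mod (sm.1 <<< (1 : Nat)) n            -- s = (s << 1) % n
      if d ≤ sm.2 then (PySem.Int.mod (s1 + 1) n, sm.2 - d)     -- s = (s + 1) % n; m -= d
      else (s1, sm.2))
    (0, n)).1

-- ===== PORT B =====
-- inner `while lo < hi` binary-search loop of Source B, step for step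
def bsGo (t : List Int) (m : Int) (lo hi : Nat) : Nat :=
  if h : lo < hi then
    let mid := (lo + hi) / 2                      -- (lo + hi) // 2, nonneg so Nat / is exact
    if t.getD mid 0 ≤ m then bsGo t m (mid + 1) hi  -- tlist[mid] <= m (mid in range)
    else bsGo t m lo mid
  else lo
termination_by hi - lo
decreasing_by all_goals omega

-- outer `while m > 0` loop of Source B; fuel n.toNat + 1 is enough since m drops by ≥ 1
-- each pass.  The `i = 0` branch is unreachable in Source B's runs (tlist[0] = 1 ≤ m
-- whenever m > 0) and only makes the function total.
def bzGo (t : List Int) (fuel : Nat) (total m : Int) : Int :=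
  match fuel with
  | 0 => total
  | fuel + 1 =>
      if 0 < m then
        let i := bsGo t m 0 t.length              -- lo after the search; i = lo - 1 below
        if i = 0 then total
        else bzGo t fuel (total + (1 : Int) <<< (i - 1)) (m - t.getD (i - 1) 0)
      else total

def A357073_alt (n : Int) : Int :=
  let tlist := tlistFor n
  PySem.Int.mod (bzGo tlist (n.toNat + 1) 0 n) n  -- return total % n

-- ===== PRECONDITION & SPEC =====
-- Pre_ excludes exactly n = 0, where A raises ZeroDivisionError at `% n`.
def Pre_A357073 (n : Int) : Prop := n ≠ 0
instance (n : Int) : Decidable (Pre_A357073 n) := by unfold Pre_A357073; infer_instance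
def pvWitness_A357073 : Int := (7)

def Spec_A357073 (n : Int) (out : Int) : Prop := out = A357073_alt n
instance (n : Int) (out : Int) : Decidable (Spec_A357073 n out) := by unfold Spec_A357073; infer_instance

-- ===== CLAIM (what is proved, stated in full; the proofs are below) =====
def Claim_equal_A357073 : Prop := ∀ (n : Int), Dom_A357073 n → Pre_A357073 n → Spec_A357073 n (A357073 n)

-- ===== LEMMAS AND PROOFS =====

-- value of the greedy Zeckendorf scan read as a binary number (Horner, no mod)
def vAux : List Int → Int → Int → Int
  | [], s, _ => s
  | d :: ds, s, m => if d ≤ m then vAux ds (2 * s + 1) (m - d) else vAux ds (2 * s) m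

-- same scan read as a sum of powers of two
def wAux : List Int → Int → Int
  | [], _ => 0
  | d :: ds, m => if d ≤ m then 2 ^ ds.length + wAux ds (m - d) else wAux ds m

-- descending chain shape of (tlistFor n).reverse: strictly decreasing, each element
-- at most twice its successor, ending in 1
def chain : List Int → Prop
  | [] => True
  | [d] => d = 1
  | d :: d' :: rest => d' < d ∧ d ≤ 2 * d' ∧ chain (d' :: rest)

def SortedLE (t : List Int) : Prop :=
  ∀ i j : Nat, i ≤ j → j < t.length → t.getD i 0 ≤ t.getD j 0

def SplitAt (t : List Int) (m : Int) (r : Nat) : Prop :=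
  r ≤ t.length ∧ (∀ k, k < r → t.getD k 0 ≤ m) ∧
    (∀ k, r ≤ k → k < t.length → m < t.getD k 0)

def ZInv : List Int → Int → Prop
  | [], m => m ≤ 0
  | d :: _, m => m < 2 * d

theorem pymod_emod (a n : Int) (hn : n ≠ 0) :
    (PySem.Int.mod a n) % n = a % n := by
  rcases lt_or_gt_of_ne hn with hneg | hpos
  · have h1 : PySem.Int.mod a n = -(PySem.Int.mod (-a) (-n)) := by
      have h0 := PySem.Int.mod_neg_neg (-a) (-n)
      simp only [neg_neg] at h0; exact h0
    rw [h1, PySem.Int.mod_eq_emod_of_pos (by omega : (0:Int) < -n)]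
    have h2 : (-a) % (-n) = (-a) % n := Int.emod_neg (-a) n
    rw [h2]
    have hM : Int.ModEq n ((-a) % n) (-a) := Int.emod_emod_of_dvd (-a) (dvd_refl n)
    simpa using hM.neg
  · rw [PySem.Int.mod_eq_emod_of_pos hpos, Int.emod_emod_of_dvd a dvd_rfl]

theorem pymod_congr (a b n : Int) (hn : n ≠ 0) (h : a % n = b % n) :
    PySem.Int.mod a n = PySem.Int.mod b n := by
  rcases lt_or_gt_of_ne hn with hneg | hpos
  · have ha := PySem.Int.mod_neg_neg (-a) (-n)
    have hb := PySem.Int.mod_neg_neg (-b) (-n)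
    simp only [neg_neg] at ha hb
    rw [ha, hb, PySem.Int.mod_eq_emod_of_pos (by omega : (0:Int) < -n),
        PySem.Int.mod_eq_emod_of_pos (by omega : (0:Int) < -n)]
    have h2 : (-a) % n = (-b) % n := Int.ModEq.neg h
    rw [Int.emod_neg, Int.emod_neg, h2]
  · rw [PySem.Int.mod_eq_emod_of_pos hpos, PySem.Int.mod_eq_emod_of_pos hpos, h]

theorem pymod_zero (n : Int) (hn : n ≠ 0) : PySem.Int.mod 0 n = 0 := by
  rcases lt_or_gt_of_ne hn with hneg | hpos
  · have h := PySem.Int.mod_neg_neg 0 (-n)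
    simp only [neg_zero, neg_neg] at h
    rw [h, PySem.Int.mod_eq_emod_of_pos (by omega : (0:Int) < -n)]
    simp
  · rw [PySem.Int.mod_eq_emod_of_pos hpos]; simp

-- A's loop keeps s ≡ (Horner value) mod n
theorem foldA_eq_vAux (n : Int) (hn : n ≠ 0) :
    ∀ (ds : List Int) (s m : Int),
      (ds.foldl
        (fun (sm : Int × Int) d =>
          let s1 := PySem.Int.mod (sm.1 <<< (1 : Nat)) n
          if d ≤ sm.2 then (PySem.Int.mod (s1 + 1) n, sm.2 - d) else (s1, sm.2))
        (PySem.Int.mod s n, m)).1 = PySem.Int.mod (vAux ds s m) n := by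
  intro ds
  induction ds with
  | nil => intro s m; simp [vAux]
  | cons d ds ih =>
    intro s m
    have hshift : (PySem.Int.mod s n) <<< (1 : Nat) = 2 * PySem.Int.mod s n := by
      rw [Int.shiftLeft_eq]; ring
    have h2 : PySem.Int.mod (2 * PySem.Int.mod s n) n = PySem.Int.mod (2 * s) n := by
      apply pymod_congr _ _ _ hn
      calc (2 * PySem.Int.mod s n) % n = (2 % n) * ((PySem.Int.mod s n) % n) % n := by
            rw [Int.mul_emod]
        _ = (2 % n) * (s % n) % n := by rw [pymod_emod s n hn]
        _ = (2 * s) % n := by rw [← Int.mul_emod]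
    have h3 : PySem.Int.mod (PySem.Int.mod (2 * s) n + 1) n = PySem.Int.mod (2 * s + 1) n := by
      apply pymod_congr _ _ _ hn
      calc (PySem.Int.mod (2 * s) n + 1) % n
            = ((PySem.Int.mod (2 * s) n) % n + 1 % n) % n := by rw [Int.add_emod]
        _ = ((2 * s) % n + 1 % n) % n := by rw [pymod_emod (2 * s) n hn]
        _ = (2 * s + 1) % n := by rw [← Int.add_emod]
    simp only [List.foldl, hshift, h2]
    by_cases hd : d ≤ m
    · simp only [h3, vAux, if_pos hd]
      exact ih (2 * s + 1) (m - d)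
    · simp only [if_neg hd, vAux]
      exact ih (2 * s) m

-- Horner value of the scan = its power-of-two sum (plus the carried-in prefix)
theorem vAux_eq_wAux : ∀ (ds : List Int) (s m : Int),
    vAux ds s m = s * 2 ^ ds.length + wAux ds m := by
  intro ds
  induction ds with
  | nil => intro s m; simp [vAux, wAux]
  | cons d ds ih =>
    intro s m
    by_cases hd : d ≤ m
    · simp only [vAux, wAux, if_pos hd, List.length_cons, ih]
      ring
    · simp only [vAux, wAux, if_neg hd, List.length_cons, ih]
      ring

theorem chain_pos : ∀ (ds : List Int), chain ds → ∀ x ∈ ds, 1 ≤ x := by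
  intro ds
  induction ds with
  | nil => simp
  | cons d tail ih =>
    cases tail with
    | nil =>
      intro h x hx
      simp only [chain] at h
      simp only [List.mem_singleton] at hx
      omega
    | cons d' rest =>
      intro h x hx
      obtain ⟨h1, h2, h3⟩ := h
      have hrest := ih h3
      rcases List.mem_cons.mp hx with rfl | hx'
      · have := hrest d' (List.mem_cons_self ..)
        omega
      · exact hrest x hx'

theorem chain_head_lt : ∀ (ds' : List Int) (d : Int), chain (d :: ds') → ∀ x ∈ ds', x < d := by
  intro ds'
  induction ds' with
  | nil => simp
  | cons d' rest ih =>
    intro d h x hx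
    obtain ⟨h1, h2, h3⟩ := h
    rcases List.mem_cons.mp hx with rfl | hx'
    · exact h1
    · have := ih d' h3 x hx'
      omega

theorem chain_tail : ∀ (ds' : List Int) (d : Int), chain (d :: ds') → chain ds' := by
  intro ds' d h
  cases ds' with
  | nil => trivial
  | cons d' rest => exact h.2.2

theorem chain_pairwise : ∀ (ds : List Int), chain ds → List.Pairwise (fun a b => b < a) ds := by
  intro ds
  induction ds with
  | nil => intro _; exact List.Pairwise.nil
  | cons d tail ih =>
    intro h
    exact List.pairwise_cons.mpr
      ⟨fun x hx => chain_head_lt tail d h x hx, ih (chain_tail tail d h)⟩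

theorem chain_sortedLE (ds : List Int) (h : chain ds) : SortedLE ds.reverse := by
  have hp : List.Pairwise (fun a b => a < b) ds.reverse := by
    rw [List.pairwise_reverse]
    exact chain_pairwise ds h
  intro i j hij hj
  rcases Nat.lt_or_ge i j with hlt | hge
  · have hi : i < ds.reverse.length := lt_trans hlt hj
    rw [List.getD_eq_getElem ds.reverse 0 hi, List.getD_eq_getElem ds.reverse 0 hj]
    exact le_of_lt (List.pairwise_iff_getElem.mp hp i j hi hj hlt)
  · have : i = j := le_antisymm hij hge
    subst this; exact le_rfl

theorem getD_app_left (front : List Int) (d : Int) (k : Nat) (hk : k < front.length) :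
    (front ++ [d]).getD k 0 = front.getD k 0 := by
  have hk' : k < (front ++ [d]).length := by simp; omega
  rw [List.getD_eq_getElem _ 0 hk', List.getD_eq_getElem front 0 hk]
  exact List.getElem_append_left hk

theorem getD_app_last (front : List Int) (d : Int) :
    (front ++ [d]).getD front.length 0 = d := by
  have hk' : front.length < (front ++ [d]).length := by simp
  rw [List.getD_eq_getElem _ 0 hk']
  simp

theorem mem_of_getD (t : List Int) (k : Nat) (hk : k < t.length) : t.getD k 0 ∈ t := by
  rw [List.getD_eq_getElem t 0 hk]
  exact List.getElem_mem hk

theorem splitAt_unique (t : List Int) (m : Int) (r1 r2 : Nat)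
    (h1 : SplitAt t m r1) (h2 : SplitAt t m r2) : r1 = r2 := by
  by_contra hne
  rcases Nat.lt_or_ge r1 r2 with h | h
  · have hlt : r1 < t.length := lt_of_lt_of_le h h2.1
    have ha := h2.2.1 r1 h
    have hb := h1.2.2 r1 le_rfl hlt
    omega
  · have h' : r2 < r1 := lt_of_le_of_ne h fun e => hne e.symm
    have hlt : r2 < t.length := lt_of_lt_of_le h' h1.1
    have ha := h1.2.1 r2 h'
    have hb := h2.2.2 r2 le_rfl hlt
    omega

theorem bsGo_split (t : List Int) (m : Int) (hs : SortedLE t) :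
    ∀ (k lo hi : Nat), hi - lo ≤ k → lo ≤ hi → hi ≤ t.length →
      (∀ j, j < lo → t.getD j 0 ≤ m) → (∀ j, hi ≤ j → j < t.length → m < t.getD j 0) →
      SplitAt t m (bsGo t m lo hi) := by
  intro k
  induction k with
  | zero =>
    intro lo hi hk hlh hhl hlow hup
    have : lo = hi := by omega
    subst this
    rw [bsGo]
    simp only [lt_irrefl, dite_false]
    exact ⟨hhl, hlow, fun j hj => hup j hj⟩
  | succ k ih =>
    intro lo hi hk hlh hhl hlow hup
    rw [bsGo]
    by_cases h : lo < hi
    · simp only [h, dite_true]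
      by_cases hmid : t.getD ((lo + hi) / 2) 0 ≤ m
      · simp only [hmid, if_true]
        apply ih ((lo + hi) / 2 + 1) hi (by omega) (by omega) hhl
        · intro j hj
          exact le_trans (hs j ((lo + hi) / 2) (by omega) (by omega)) hmid
        · exact hup
      · simp only [hmid, if_false]
        apply ih lo ((lo + hi) / 2) (by omega) (by omega) (by omega) hlow
        intro j hj hjl
        exact lt_of_lt_of_le (lt_of_not_ge hmid) (hs ((lo + hi) / 2) j hj hjl)
    · simp only [h, dite_false]
      have : lo = hi := by omega
      subst this
      exact ⟨hhl, hlow, fun j hj => hup j hj⟩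

theorem bsGo_splitAt (t : List Int) (m : Int) (hs : SortedLE t) :
    SplitAt t m (bsGo t m 0 t.length) :=
  bsGo_split t m hs t.length 0 t.length (by omega) (by omega) le_rfl
    (by intro j hj; omega) (by intro j hj hjl; omega)

theorem sortedLE_front (front : List Int) (d : Int) (hsort : SortedLE (front ++ [d])) :
    SortedLE front := by
  intro i j hij hj
  have h := hsort i j hij (by simp; omega)
  rwa [getD_app_left front d i (by omega), getD_app_left front d j hj] at h

-- a trailing element larger than the remainder changes nothing for the whole run
theorem bz_drop (front : List Int) (d : Int)
    (hpos : ∀ x ∈ front, 0 < x)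
    (hsort : SortedLE (front ++ [d])) :
    ∀ (fuel : Nat) (total m : Int), m < d →
      bzGo (front ++ [d]) fuel total m = bzGo front fuel total m := by
  have hsf : SortedLE front := sortedLE_front front d hsort
  intro fuel
  induction fuel with
  | zero => intro total m _; rfl
  | succ fuel ih =>
    intro total m hmd
    simp only [bzGo]
    by_cases hm : 0 < m
    · simp only [hm, if_true]
      have hfull := bsGo_splitAt (front ++ [d]) m hsort
      have hfr := bsGo_splitAt front m hsf
      -- the split point of front also splits front ++ [d]
      have hext : SplitAt (front ++ [d]) m (bsGo front m 0 front.length) := by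
        obtain ⟨hle, hlow, hup⟩ := hfr
        refine ⟨by simp; omega, ?_, ?_⟩
        · intro k hk
          rw [getD_app_left front d k (by omega)]
          exact hlow k hk
        · intro k hk hkl
          simp only [List.length_append, List.length_cons, List.length_nil] at hkl
          rcases Nat.lt_or_ge k front.length with hkf | hkf
          · rw [getD_app_left front d k hkf]
            exact hup k hk hkf
          · have : k = front.length := by omega
            subst this
            rw [getD_app_last]
            exact hmd
      have heq : bsGo (front ++ [d]) m 0 (front ++ [d]).length
          = bsGo front m 0 front.length :=
        splitAt_unique _ m _ _ hfull hext
      rw [heq]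
      by_cases hz : bsGo front m 0 front.length = 0
      · simp only [hz, if_true]
      · simp only [hz, if_false]
        have hib : bsGo front m 0 front.length ≤ front.length := hfr.1
        have hidx : bsGo front m 0 front.length - 1 < front.length := by omega
        rw [getD_app_left front d _ hidx]
        apply ih
        have hmem := mem_of_getD front _ hidx
        have := hpos _ hmem
        omega
    · simp only [hm, if_false]

-- the outer loop computes wAux over the descending list
theorem bz_eq_wAux : ∀ (ds : List Int), ∀ (m total : Int) (fuel : Nat),
    chain ds → ZInv ds m → m.toNat < fuel →
    bzGo ds.reverse fuel total m = total + wAux ds m := by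
  intro ds
  induction ds with
  | nil =>
    intro m total fuel _ hinv _
    simp only [ZInv] at hinv
    cases fuel with
    | zero => simp [bzGo, wAux]
    | succ fuel =>
      have : ¬ (0 < m) := by omega
      simp [bzGo, this, wAux]
  | cons d ds' ih =>
    intro m total fuel hch hinv hfuel
    simp only [ZInv] at hinv
    have hpos' : ∀ x ∈ ds', 0 < x := fun x hx => by
      have := chain_pos (d :: ds') hch x (List.mem_cons_of_mem d hx); omega
    have hd1 : (1:Int) ≤ d := chain_pos (d :: ds') hch d (List.mem_cons_self ..)
    have hsort : SortedLE ((d :: ds').reverse) := chain_sortedLE _ hch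
    rw [List.reverse_cons] at hsort
    have hposr : ∀ x ∈ ds'.reverse, 0 < x := fun x hx => hpos' x (List.mem_reverse.mp hx)
    rw [List.reverse_cons]
    by_cases hd : d ≤ m
    · -- pick: the binary search lands on the last element d
      have hm : 0 < m := by omega
      cases fuel with
      | zero => omega
      | succ fuel =>
        simp only [bzGo, hm, if_true]
        have hsplit := bsGo_splitAt (ds'.reverse ++ [d]) m hsort
        have hall : SplitAt (ds'.reverse ++ [d]) m (ds'.reverse ++ [d]).length := by
          refine ⟨le_rfl, ?_, ?_⟩
          · intro k hk
            have hmem := mem_of_getD (ds'.reverse ++ [d]) k (by simpa using hk)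
            rcases List.mem_append.mp hmem with hmf | hml
            · have hx := chain_head_lt ds' d hch _ (List.mem_reverse.mp hmf)
              omega
            · simp only [List.mem_singleton] at hml
              rw [hml]; exact hd
          · intro k hk hkl; omega
        have heq : bsGo (ds'.reverse ++ [d]) m 0 (ds'.reverse ++ [d]).length
            = (ds'.reverse ++ [d]).length := splitAt_unique _ m _ _ hsplit hall
        have hlen : (ds'.reverse ++ [d]).length = ds'.length + 1 := by simp
        have hnz : (ds'.reverse ++ [d]).length ≠ 0 := by omega
        simp only [heq, hnz, if_false]
        have hi1 : (ds'.reverse ++ [d]).length - 1 = ds'.reverse.length := by simp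
        rw [hi1, getD_app_last]
        have hdrop := bz_drop ds'.reverse d hposr hsort fuel
          (total + (1:Int) <<< ds'.reverse.length) (m - d) (by omega)
        rw [hdrop]
        have hinv' : ZInv ds' (m - d) := by
          cases ds' with
          | nil =>
            have : d = 1 := hch
            simp only [ZInv]; omega
          | cons d' rest =>
            obtain ⟨h1, h2, _⟩ := hch
            simp only [ZInv]
            omega
        have hfuel' : (m - d).toNat < fuel := by omega
        rw [ih (m - d) (total + (1:Int) <<< ds'.reverse.length) fuel
            (chain_tail ds' d hch) hinv' hfuel']
        have hshift : (1:Int) <<< ds'.reverse.length = 2 ^ ds'.length := by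
          rw [Int.shiftLeft_eq, List.length_reverse]; ring
        simp only [wAux, hd, if_true, hshift]
        ring
    · -- skip: d > m, the trailing element is never touched
      rw [bz_drop ds'.reverse d hposr hsort fuel total m (by omega)]
      have hinv' : ZInv ds' m := by
        cases ds' with
        | nil =>
          have : d = 1 := hch
          simp only [ZInv]; omega
        | cons d' rest =>
          obtain ⟨h1, h2, _⟩ := hch
          simp only [ZInv] at hinv ⊢
          omega
      rw [ih m total fuel (chain_tail ds' d hch) hinv' hfuel]
      simp only [wAux, hd, if_false]

-- tlistFor n: chain shape, and n < 2 * (largest element)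
theorem tlist_good : ∀ (fuel : Nat) (a b n : Int) (acc : List Int),
    1 ≤ a → a < b → chain acc.reverse → acc.reverse.head? = some b →
    n - a - b < (fuel : Int) →
    chain (tlistGo fuel a b n acc).reverse ∧
      ∃ b', (tlistGo fuel a b n acc).reverse.head? = some b' ∧ n < 2 * b' := by
  intro fuel
  induction fuel with
  | zero =>
    intro a b n acc ha hab hch hhd hfe
    simp only [tlistGo]
    exact ⟨hch, b, hhd, by push_cast at hfe; omega⟩
  | succ fuel ih =>
    intro a b n acc ha hab hch hhd hfe
    simp only [tlistGo]
    by_cases hc : a + b ≤ n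
    · simp only [hc, if_true]
      apply ih b (a + b) n (acc ++ [a + b]) (by omega) (by omega)
      · rw [List.reverse_append]
        simp only [List.reverse_singleton, List.singleton_append]
        cases hrv : acc.reverse with
        | nil => rw [hrv] at hhd; simp at hhd
        | cons x rest =>
          rw [hrv] at hhd hch
          simp only [List.head?_cons, Option.some.injEq] at hhd
          subst hhd
          exact ⟨by omega, by omega, hch⟩
      · rw [List.reverse_append]
        simp
      · push_cast at hfe ⊢
        omega
    · simp only [hc, if_false]
      exact ⟨hch, b, hhd, by omega⟩

-- ===== VERDICT (by name: the statement is the Claim_ definition above) =====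
theorem A357073_spec : Claim_equal_A357073 := by
  intro n _ hn
  unfold Spec_A357073 A357073 A357073_alt
  simp only [PySem.List.slice?_none_none_neg_one, Option.getD_some]
  -- A's fold = wAux mod n
  have hA : ((tlistFor n).reverse.foldl
      (fun (sm : Int × Int) d =>
        let s1 := PySem.Int.mod (sm.1 <<< (1 : Nat)) n
        if d ≤ sm.2 then (PySem.Int.mod (s1 + 1) n, sm.2 - d) else (s1, sm.2))
      (0, n)).1 = PySem.Int.mod (vAux (tlistFor n).reverse 0 n) n := by
    have := foldA_eq_vAux n hn (tlistFor n).reverse 0 n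
    rwa [pymod_zero n hn] at this
  rw [hA, vAux_eq_wAux]
  simp only [zero_mul, zero_add]
  -- B's loop = wAux
  have hg := tlist_good (n.toNat + 2) 1 2 n [1, 2] (by omega) (by omega)
    (by simp only [List.reverse_cons, List.reverse_nil, List.nil_append,
          List.singleton_append]; exact ⟨by omega, by omega, rfl⟩)
    (by simp) (by push_cast; omega)
  obtain ⟨hch, b', hhd, hb'⟩ := hg
  have hch' : chain (tlistFor n).reverse := hch
  have hhd' : (tlistFor n).reverse.head? = some b' := hhd
  have hinv : ZInv (tlistFor n).reverse n := by
    cases hrv : (tlistFor n).reverse with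
    | nil => rw [hrv] at hhd'; simp at hhd'
    | cons x rest =>
      rw [hrv] at hhd'
      simp only [List.head?_cons, Option.some.injEq] at hhd'
      subst hhd'
      simp only [ZInv]
      exact hb'
  have hB := bz_eq_wAux (tlistFor n).reverse n 0 (n.toNat + 1) hch' hinv (by omega)
  rw [List.reverse_reverse] at hB
  rw [hB]
  simp
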